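-- pv_equiv track=rewrite | github.com/hyung1721/cs372_term_project | crawl.py | after_tokenize
-- ===== SOURCE A (Python) =====
-- def after_tokenize(words):
--     for index,word in enumerate(words):
--         if index==len(words)-1: break
--         if word=='gon' and words[index+1] =='na':
--             words[index] = 'gonna'
--             words.pop(index+1)
--         if word=='wan' and words[index+1] =='na':
--             words[index] = 'wanna'
--             words.pop(index+1)
--     return words
-- ===== SOURCE B (Python) =====
-- def after_tokenize(words):
--     out = []
--     i = 0
--     n = len(words)
--     while i < n:
--         w = words[i]
--         if w == 'gon' and i + 1 < n and words[i + 1] == 'na':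
--             out.append('gonna')
--             i += 2
--         elif w == 'wan' and i + 1 < n and words[i + 1] == 'na':
--             out.append('wanna')
--             i += 2
--         else:
--             out.append(w)
--             i += 1
--     return out
-- ===== Notes on version B (the rewrite author's own statement) =====
-- stated objective: alternative
-- what changed: Replaces the in-place enumerate-and-pop mutation loop with a single forward pass that builds a fresh output list and advances by 2 over merged 'gon'/'wan'+'na' pairs (no mutation of the argument).
import Mathlib
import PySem

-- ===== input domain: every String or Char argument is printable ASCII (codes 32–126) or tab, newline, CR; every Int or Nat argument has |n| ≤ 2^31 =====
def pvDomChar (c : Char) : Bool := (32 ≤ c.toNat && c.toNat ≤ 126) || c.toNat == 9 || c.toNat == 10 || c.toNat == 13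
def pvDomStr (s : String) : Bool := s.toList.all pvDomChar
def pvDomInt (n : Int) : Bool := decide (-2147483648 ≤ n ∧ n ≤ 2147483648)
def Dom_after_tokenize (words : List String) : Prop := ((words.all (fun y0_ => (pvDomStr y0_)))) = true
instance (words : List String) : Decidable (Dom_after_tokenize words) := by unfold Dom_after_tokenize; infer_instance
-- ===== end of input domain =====

-- B builds a fresh output list in one forward pass instead of A's in-place enumerate-and-pop
-- loop; A mutates its argument in place (B does not): the equivalence proved here is about the
-- RETURN value only.

-- ===== PORT A =====
-- Python A iterates `enumerate(words)` over the live, mutated list: each step reads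
-- word = words[index] with the current list, breaks at index == len-1, runs the two merge
-- `if`s (the second re-reads the possibly-mutated list), then index increases by 1.
-- pv_step is the loop body's mutation of the list; pv_step_len_le is cited by termination.
def pv_step (ws : List String) (index : Nat) (word : String) : List String :=
  let ws1 := if word = "gon" ∧ ws[index+1]? = some "na"
             then (ws.set index "gonna").eraseIdx (index+1) else ws
  if word = "wan" ∧ ws1[index+1]? = some "na"
  then (ws1.set index "wanna").eraseIdx (index+1) else ws1

theorem pv_erase_set_len_le (l : List String) (i : Nat) (a : String) :
    ((l.set i a).eraseIdx (i+1)).length ≤ l.length := by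
  simp only [List.length_eraseIdx, List.length_set]
  split <;> omega

theorem pv_step_len_le (ws : List String) (index : Nat) (word : String) :
    (pv_step ws index word).length ≤ ws.length := by
  unfold pv_step
  dsimp only
  split
  · split
    · exact le_trans (pv_erase_set_len_le _ _ _) (pv_erase_set_len_le _ _ _)
    · exact pv_erase_set_len_le _ _ _
  · split
    · exact pv_erase_set_len_le _ _ _
    · exact le_refl _

def after_tokenize_loop (ws : List String) (index : Nat) : List String :=
  if h : index < ws.length then
    let word := ws[index]
    if index = ws.length - 1 then ws
    else after_tokenize_loop (pv_step ws index word) (index+1)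
  else ws
termination_by ws.length - index
decreasing_by
  have := pv_step_len_le ws index ws[index]
  omega

def after_tokenize (words : List String) : List String := after_tokenize_loop words 0

-- ===== PORT B =====
def after_tokenize_alt_go : List String → List String
  | [] => []
  | [w] => [w]
  | w :: x :: rest =>
    if w = "gon" ∧ x = "na" then "gonna" :: after_tokenize_alt_go rest
    else if w = "wan" ∧ x = "na" then "wanna" :: after_tokenize_alt_go rest
    else w :: after_tokenize_alt_go (x :: rest)

def after_tokenize_alt (words : List String) : List String := after_tokenize_alt_go words

-- ===== PRECONDITION & SPEC =====
def Spec_after_tokenize (words : List String) (out : List String) : Prop := out = after_tokenize_alt words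
instance (words : List String) (out : List String) : Decidable (Spec_after_tokenize words out) := by unfold Spec_after_tokenize; infer_instance

-- ===== CLAIM (what is proved, stated in full; the proofs are below) =====
def Claim_equal_after_tokenize : Prop := ∀ (words : List String), Dom_after_tokenize words → Spec_after_tokenize words (after_tokenize words)

-- ===== LEMMAS AND PROOFS =====

-- Evaluation lemmas for B's pass.
theorem pv_alt_go_nil : after_tokenize_alt_go [] = [] := by
  simp [after_tokenize_alt_go]

theorem pv_alt_go_one (w : String) : after_tokenize_alt_go [w] = [w] := by
  simp [after_tokenize_alt_go]

theorem pv_alt_go_cons (w x : String) (rest : List String) :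
    after_tokenize_alt_go (w :: x :: rest) =
      if w = "gon" ∧ x = "na" then "gonna" :: after_tokenize_alt_go rest
      else if w = "wan" ∧ x = "na" then "wanna" :: after_tokenize_alt_go rest
      else w :: after_tokenize_alt_go (x :: rest) := by
  simp [after_tokenize_alt_go]

-- How A's loop body acts in each of its three cases.
theorem pv_step_gon (ws : List String) (index : Nat) (h : ws[index+1]? = some "na") :
    pv_step ws index "gon" = (ws.set index "gonna").eraseIdx (index+1) := by
  unfold pv_step
  simp [h]

theorem pv_step_wan (ws : List String) (index : Nat) (h : ws[index+1]? = some "na") :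
    pv_step ws index "wan" = (ws.set index "wanna").eraseIdx (index+1) := by
  unfold pv_step
  simp [h]

theorem pv_step_none (ws : List String) (index : Nat) (word : String)
    (hg : ¬(word = "gon" ∧ ws[index+1]? = some "na"))
    (hw : ¬(word = "wan" ∧ ws[index+1]? = some "na")) :
    pv_step ws index word = ws := by
  unfold pv_step
  rw [if_neg hg, if_neg hw]

-- Merging in place: set index then pop index+1 = prefix ++ merged word ++ rest after the pair.
theorem pv_merge_eq (ws : List String) (index : Nat) (a : String) (h : index < ws.length) :
    (ws.set index a).eraseIdx (index+1) = ws.take index ++ a :: ws.drop (index + 2) := by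
  rw [List.set_eq_take_append_cons_drop, if_pos h, List.eraseIdx_eq_take_drop_succ]
  have htk : (ws.take index).length = index := by simp; omega
  simp [List.take_append, List.drop_append, htk, List.take_take]
  rw [List.drop_eq_nil_of_le (by simp; omega), List.nil_append,
    (by omega : index + 1 + 1 - index = 2), List.drop_succ_cons, List.drop_drop]

-- take/drop of a list split around position index.
theorem pv_split (pre : List String) (a : String) (rest : List String) (index : Nat)
    (hp : pre.length = index) :
    (pre ++ a :: rest).take (index+1) = pre ++ [a] ∧
      (pre ++ a :: rest).drop (index+1) = rest := by
  subst hp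
  constructor
  · simp [List.take_append, List.take_of_length_le]
  · simp [List.drop_append, List.drop_eq_nil_of_le]

-- Invariant: at loop position `index`, A's loop returns the untouched prefix followed by B's
-- pass over the remaining suffix.
theorem after_tokenize_loop_eq (n : Nat) :
    ∀ (ws : List String) (index : Nat), ws.length - index ≤ n →
      after_tokenize_loop ws index = ws.take index ++ after_tokenize_alt_go (ws.drop index) := by
  induction n with
  | zero =>
    intro ws index hle
    have h : ¬ index < ws.length := by omega
    rw [after_tokenize_loop.eq_def, dif_neg h,
      List.take_of_length_le (by omega : ws.length ≤ index),
      List.drop_eq_nil_of_le (by omega : ws.length ≤ index), pv_alt_go_nil, List.append_nil]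
  | succ n ih =>
    intro ws index hle
    rw [after_tokenize_loop.eq_def]
    by_cases h : index < ws.length
    · rw [dif_pos h]
      have htk : (ws.take index).length = index := by simp; omega
      by_cases hlast : index = ws.length - 1
      · -- break: the suffix is a single word, which B keeps unchanged
        have hdrop : ws.drop index = [ws[index]] := by
          rw [List.drop_eq_getElem_cons h,
            List.drop_eq_nil_of_le (by omega : ws.length ≤ index + 1)]
        rw [if_pos hlast, hdrop, pv_alt_go_one, ← hdrop, List.take_append_drop]
      · rw [if_neg hlast]
        have h1 : index + 1 < ws.length := by omega
        have hget1 : ws[index+1]? = some ws[index+1] := List.getElem?_eq_getElem h1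
        have hdrop : ws.drop index = ws[index] :: ws[index+1] :: ws.drop (index + 2) := by
          rw [List.drop_eq_getElem_cons h, List.drop_eq_getElem_cons h1]
        by_cases hg : ws[index] = "gon" ∧ ws[index+1] = "na"
        · -- merge "gon"+"na"
          rw [hg.1, pv_step_gon ws index (by rw [hget1, hg.2]), pv_merge_eq ws index _ h]
          rw [ih _ _ (by simp [htk]; omega)]
          obtain ⟨e1, e2⟩ := pv_split (ws.take index) "gonna" (ws.drop (index+2)) index htk
          rw [e1, e2, hdrop, pv_alt_go_cons, if_pos hg]
          simp
        · by_cases hw : ws[index] = "wan" ∧ ws[index+1] = "na"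
          · -- merge "wan"+"na"
            rw [hw.1, pv_step_wan ws index (by rw [hget1, hw.2]), pv_merge_eq ws index _ h]
            rw [ih _ _ (by simp [htk]; omega)]
            obtain ⟨e1, e2⟩ := pv_split (ws.take index) "wanna" (ws.drop (index+2)) index htk
            rw [e1, e2, hdrop, pv_alt_go_cons, if_neg hg, if_pos hw]
            simp
          · -- no merge: keep the word, advance by one
            have hng : ¬(ws[index] = "gon" ∧ ws[index+1]? = some "na") := by
              rw [hget1]; rintro ⟨a, b⟩; exact hg ⟨a, Option.some.inj b⟩
            have hnw : ¬(ws[index] = "wan" ∧ ws[index+1]? = some "na") := by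
              rw [hget1]; rintro ⟨a, b⟩; exact hw ⟨a, Option.some.inj b⟩
            rw [pv_step_none ws index _ hng hnw, ih ws (index+1) (by omega)]
            rw [hdrop, pv_alt_go_cons, if_neg hg, if_neg hw, ← List.drop_eq_getElem_cons h1,
              List.take_add_one, List.getElem?_eq_getElem h, Option.toList_some,
              List.append_assoc, List.singleton_append]
    · rw [dif_neg h, List.take_of_length_le (by omega : ws.length ≤ index),
        List.drop_eq_nil_of_le (by omega : ws.length ≤ index), pv_alt_go_nil, List.append_nil]

-- ===== VERDICT (by name: the statement is the Claim_ definition above) =====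
theorem after_tokenize_spec : Claim_equal_after_tokenize := by
  intro words _
  unfold Spec_after_tokenize after_tokenize after_tokenize_alt
  simpa using after_tokenize_loop_eq words.length words 0 (by omega)
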